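-- pv_equiv track=rewrite | github.com/Strawberryai/scripts_sgi | decript_frecuencies.py | sustituir
-- ===== SOURCE A (Python) =====
-- def sustituir(mensaje, dlist, a, b):
--     mensaje = str(mensaje)
--     mensajeNuevo = ""
--
--     for i in range(0, len(mensaje)):
--         letra = mensaje[i]
--         if (letra == a and not i in dlist):
--             mensajeNuevo += b
--             dlist.append(i)
--         else:
--             mensajeNuevo += letra
--
--     return mensajeNuevo, dlist
-- ===== SOURCE B (Python) =====
-- def sustituir(mensaje, dlist, a, b):
--     mensaje = str(mensaje)
--     positions = [i for i, ch in enumerate(mensaje) if ch == a and i not in dlist]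
--     posset = set(positions)
--     mensajeNuevo = "".join(b if i in posset else ch for i, ch in enumerate(mensaje))
--     dlist.extend(positions)
--     return mensajeNuevo, dlist
-- ===== Notes on version B (the rewrite author's own statement) =====
-- stated objective: simpler
-- what changed: Replaces the single interleaved loop (which mutates dlist while also consulting it for membership) with two separate passes: first collect the substitution positions, then build the output string from that set and extend dlist once.
import Mathlib
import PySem

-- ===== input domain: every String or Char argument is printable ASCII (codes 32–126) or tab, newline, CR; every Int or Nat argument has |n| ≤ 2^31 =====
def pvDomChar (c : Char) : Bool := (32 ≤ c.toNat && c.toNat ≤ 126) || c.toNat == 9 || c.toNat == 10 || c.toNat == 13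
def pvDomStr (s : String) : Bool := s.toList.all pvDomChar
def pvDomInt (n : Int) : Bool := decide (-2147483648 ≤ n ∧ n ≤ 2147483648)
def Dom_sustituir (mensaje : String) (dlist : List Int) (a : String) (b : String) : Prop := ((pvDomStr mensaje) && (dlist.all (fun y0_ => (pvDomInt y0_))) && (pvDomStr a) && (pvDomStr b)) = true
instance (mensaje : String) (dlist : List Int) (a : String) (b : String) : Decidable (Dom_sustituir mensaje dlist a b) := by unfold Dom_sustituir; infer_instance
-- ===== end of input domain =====

-- B does the substitution in two separate passes (collect positions, then build the string)
-- instead of A's single interleaved loop; same return value, and both append the same indices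
-- in the same ascending order to the dlist argument (Python-side mutation is identical).

-- ===== PORT A =====
-- A's loop: for i in range(len(mensaje)): grow mensajeNuevo and dlist in one pass.
def sustituirGoA (a b : String) (cs : List Char) (i : Nat) (acc : List Char) (dl : List Int) : List Char × List Int :=
  match cs with
  | [] => (acc, dl)
  | c :: rest =>
    if String.mk [c] = a ∧ (i : Int) ∉ dl then
      sustituirGoA a b rest (i + 1) (acc ++ b.toList) (dl ++ [(i : Int)])
    else
      sustituirGoA a b rest (i + 1) (acc ++ [c]) dl

def sustituir (mensaje : String) (dlist : List Int) (a : String) (b : String) : String × List Int :=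
  let r := sustituirGoA a b mensaje.toList 0 [] dlist
  (String.mk r.1, r.2)

-- ===== PORT B =====
def sustituir_alt (mensaje : String) (dlist : List Int) (a : String) (b : String) : String × List Int :=
  let cs := mensaje.toList
  let positions : List Int :=
    (cs.zipIdx).filterMap (fun p => if String.mk [p.1] = a ∧ (p.2 : Int) ∉ dlist then some ((p.2 : Int)) else none)
  let posset : PySem.Set Int := PySem.Set.ofList positions
  let news : List Char := (cs.zipIdx).flatMap (fun p => if (p.2 : Int) ∈ posset then b.toList else [p.1])
  (String.mk news, dlist ++ positions)

-- ===== PRECONDITION & SPEC =====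
def Spec_sustituir (mensaje : String) (dlist : List Int) (a : String) (b : String) (out : String × List Int) : Prop := out = sustituir_alt mensaje dlist a b
instance (mensaje : String) (dlist : List Int) (a : String) (b : String) (out : String × List Int) : Decidable (Spec_sustituir mensaje dlist a b out) := by unfold Spec_sustituir; infer_instance

-- ===== CLAIM (what is proved, stated in full; the proofs are below) =====
def Claim_equal_sustituir : Prop := ∀ (mensaje : String) (dlist : List Int) (a : String) (b : String), Dom_sustituir mensaje dlist a b → Spec_sustituir mensaje dlist a b (sustituir mensaje dlist a b)

-- ===== LEMMAS AND PROOFS =====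

-- positions that A/B select, starting at index n, membership tested against the ORIGINAL dl
def posFrom (a : String) (dl : List Int) : List Char → Nat → List Int
  | [], _ => []
  | c :: rest, n =>
    if String.mk [c] = a ∧ (n : Int) ∉ dl then (n : Int) :: posFrom a dl rest (n + 1)
    else posFrom a dl rest (n + 1)

-- the characters of the output string, starting at index n
def bldFrom (a b : String) (dl : List Int) : List Char → Nat → List Char
  | [], _ => []
  | c :: rest, n =>
    if String.mk [c] = a ∧ (n : Int) ∉ dl then b.toList ++ bldFrom a b dl rest (n + 1)
    else c :: bldFrom a b dl rest (n + 1)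

theorem posFrom_ge (a : String) (dl : List Int) (cs : List Char) (n : Nat) :
    ∀ x ∈ posFrom a dl cs n, (n : Int) ≤ x := by
  induction cs generalizing n with
  | nil => simp [posFrom]
  | cons c rest ih =>
    intro x hx
    simp only [posFrom] at hx
    split at hx
    · rcases List.mem_cons.mp hx with h | h
      · omega
      · have := ih (n + 1) x h; push_cast at this ⊢; omega
    · have := ih (n + 1) x hx; push_cast at this ⊢; omega

-- A's loop, with the appended-so-far indices 'extra' (all < n) split off, equals the two-pass result.
theorem goA_eq (a b : String) (dl0 : List Int) (cs : List Char) :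
    ∀ (n : Nat) (acc : List Char) (extra : List Int), (∀ x ∈ extra, x < (n : Int)) →
      sustituirGoA a b cs n acc (dl0 ++ extra) =
        (acc ++ bldFrom a b dl0 cs n, (dl0 ++ extra) ++ posFrom a dl0 cs n) := by
  induction cs with
  | nil => intro n acc extra _; simp [sustituirGoA, posFrom, bldFrom]
  | cons c rest ih =>
    intro n acc extra hlt
    have hmem : ((n : Int) ∉ dl0 ++ extra) ↔ ((n : Int) ∉ dl0) := by
      constructor
      · intro h hn; exact h (List.mem_append_left _ hn)
      · intro h hn
        rcases List.mem_append.mp hn with h1 | h2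
        · exact h h1
        · exact absurd (hlt _ h2) (by omega)
    simp only [sustituirGoA, posFrom, bldFrom]
    by_cases hc : String.mk [c] = a ∧ (n : Int) ∉ dl0
    · rw [if_pos ⟨hc.1, hmem.mpr hc.2⟩, if_pos hc, if_pos hc]
      have : dl0 ++ extra ++ [(n : Int)] = dl0 ++ (extra ++ [(n : Int)]) := by simp
      rw [this, ih (n + 1) (acc ++ b.toList) (extra ++ [(n : Int)])
        (by intro x hx; rcases List.mem_append.mp hx with h | h
            · have := hlt x h; push_cast; omega
            · simp at h; subst h; push_cast; omega)]
      simp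
    · have hc' : ¬ (String.mk [c] = a ∧ (n : Int) ∉ dl0 ++ extra) := by
        intro h; exact hc ⟨h.1, hmem.mp h.2⟩
      rw [if_neg hc', if_neg hc, if_neg hc]
      rw [ih (n + 1) (acc ++ [c]) extra (by intro x hx; have := hlt x hx; push_cast; omega)]
      simp

theorem filterMap_eq_posFrom (a : String) (dl : List Int) (cs : List Char) :
    ∀ n : Nat,
      (cs.zipIdx n).filterMap (fun p => if String.mk [p.1] = a ∧ (p.2 : Int) ∉ dl then some ((p.2 : Int)) else none) =
        posFrom a dl cs n := by
  induction cs with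
  | nil => intro n; simp [posFrom]
  | cons c rest ih =>
    intro n
    by_cases hc : String.mk [c] = a ∧ (n : Int) ∉ dl
    · simp only [List.zipIdx_cons, List.filterMap_cons, posFrom, if_pos hc]
      rw [ih (n + 1)]
    · simp only [List.zipIdx_cons, List.filterMap_cons, posFrom, if_neg hc]
      rw [ih (n + 1)]

theorem flatMap_eq_bldFrom (a b : String) (dl : List Int) (cs : List Char) :
    ∀ (n : Nat) (extra : List Int), (∀ x ∈ extra, x < (n : Int)) →
      (cs.zipIdx n).flatMap (fun p => if (p.2 : Int) ∈ extra ++ posFrom a dl cs n then b.toList else [p.1]) =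
        bldFrom a b dl cs n := by
  induction cs with
  | nil => intro n extra _; simp [bldFrom]
  | cons c rest ih =>
    intro n extra hlt
    simp only [List.zipIdx_cons, List.flatMap_cons, posFrom, bldFrom]
    have hnextra : (n : Int) ∉ extra := fun h => absurd (hlt _ h) (by omega)
    have hnrest : (n : Int) ∉ posFrom a dl rest (n + 1) := fun h => by
      have := posFrom_ge a dl rest (n + 1) _ h; push_cast at this; omega
    by_cases hc : String.mk [c] = a ∧ (n : Int) ∉ dl
    · have hmem : (n : Int) ∈ extra ++ (n : Int) :: posFrom a dl rest (n + 1) := by simp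
      have hrw : extra ++ (n : Int) :: posFrom a dl rest (n + 1) =
          (extra ++ [(n : Int)]) ++ posFrom a dl rest (n + 1) := by simp
      simp only [if_pos hc, hrw]
      rw [if_pos (show (n : Int) ∈ (extra ++ [(n : Int)]) ++ posFrom a dl rest (n + 1) by simp)]
      congr 1
      exact ih (n + 1) (extra ++ [(n : Int)])
        (by intro x hx; rcases List.mem_append.mp hx with h | h
            · have := hlt x h; push_cast; omega
            · simp at h; subst h; push_cast; omega)
    · have hmem : (n : Int) ∉ extra ++ posFrom a dl rest (n + 1) := by
        intro h; rcases List.mem_append.mp h with h | h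
        · exact hnextra h
        · exact hnrest h
      simp only [if_neg hc, if_neg hmem]
      rw [List.singleton_append,
        ih (n + 1) extra (by intro x hx; have := hlt x hx; push_cast; omega)]

-- ===== VERDICT (by name: the statement is the Claim_ definition above) =====
theorem sustituir_spec : Claim_equal_sustituir := by
  intro mensaje dlist a b _
  unfold Spec_sustituir sustituir sustituir_alt
  have hA := goA_eq a b dlist mensaje.toList 0 [] [] (by simp)
  simp only [List.append_nil] at hA
  have hpos := filterMap_eq_posFrom a dlist mensaje.toList 0
  have hbld := flatMap_eq_bldFrom a b dlist mensaje.toList 0 [] (by simp)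
  simp only [List.nil_append] at hbld
  simp only [hA, hpos, PySem.Set.mem_ofList]
  rw [List.nil_append]
  exact Prod.ext (congrArg String.mk hbld.symm) rfl
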